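-- pv_equiv track=rewrite | github.com/STEMMIAJ/Maestro | src/coleta-honorarios/coletor_tjmg_v2.py | classificar_comarca
-- ===== SOURCE A (Python) =====
-- def classificar_comarca(texto: str) -> str:
--     lower = texto.lower()
--     if any(c in lower for c in ["governador valadares", "ipatinga", "coronel fabriciano",
--                                  "timoteo", "caratinga", "aimores", "mantena",
--                                  "teofilo otoni", "nanuque"]):
--         return "GV-e-regiao"
--     if any(c in lower for c in ["juiz de fora", "barbacena", "muriae", "manhuacu",
--                                  "ponte nova", "santos dumont"]):
--         return "Zona-Mata-Sul"
--     if any(c in lower for c in ["uberlandia", "uberaba", "ituiutaba", "araxa", "patos de minas"]):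
--         return "Triangulo-Alto-Paranaiba"
--     if any(c in lower for c in ["belo horizonte", "contagem", "betim", "santa luzia",
--                                  "ribeirao das neves", "nova lima", "lagoa santa", "sete lagoas"]):
--         return "BH-metropolitana"
--     if any(c in lower for c in ["montes claros", "pirapora", "januaria", "janauba", "salinas"]):
--         return "Norte-Mineiro"
--     return "Outros-regiao-MG"
-- ===== SOURCE B (Python) =====
-- _GRUPOS = [
--     ("GV-e-regiao", ["governador valadares", "ipatinga", "coronel fabriciano",
--                      "timoteo", "caratinga", "aimores", "mantena",
--                      "teofilo otoni", "nanuque"]),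
--     ("Zona-Mata-Sul", ["juiz de fora", "barbacena", "muriae", "manhuacu",
--                        "ponte nova", "santos dumont"]),
--     ("Triangulo-Alto-Paranaiba", ["uberlandia", "uberaba", "ituiutaba", "araxa",
--                                   "patos de minas"]),
--     ("BH-metropolitana", ["belo horizonte", "contagem", "betim", "santa luzia",
--                           "ribeirao das neves", "nova lima", "lagoa santa", "sete lagoas"]),
--     ("Norte-Mineiro", ["montes claros", "pirapora", "januaria", "janauba", "salinas"]),
-- ]
--
-- # flat keyword table: (priority, region label, keyword)
-- _PALAVRAS = [(prioridade, nome, kw)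
--              for prioridade, (nome, kws) in enumerate(_GRUPOS)
--              for kw in kws]
--
-- def classificar_comarca(texto: str) -> str:
--     lower = texto.lower()
--     melhor, rotulo = 5, "Outros-regiao-MG"
--     for prioridade, nome, palavra in _PALAVRAS:
--         if prioridade < melhor and palavra in lower:
--             melhor, rotulo = prioridade, nome
--     return rotulo
-- ===== Notes on version B (the rewrite author's own statement) =====
-- stated objective: alternative
-- what changed: Instead of five short-circuiting if-any branches, B scans one flat (priority, label, keyword) table exhaustively with a best-match accumulator, keeping the lowest-priority region matched and returning the accumulator at the end.
import Mathlib
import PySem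

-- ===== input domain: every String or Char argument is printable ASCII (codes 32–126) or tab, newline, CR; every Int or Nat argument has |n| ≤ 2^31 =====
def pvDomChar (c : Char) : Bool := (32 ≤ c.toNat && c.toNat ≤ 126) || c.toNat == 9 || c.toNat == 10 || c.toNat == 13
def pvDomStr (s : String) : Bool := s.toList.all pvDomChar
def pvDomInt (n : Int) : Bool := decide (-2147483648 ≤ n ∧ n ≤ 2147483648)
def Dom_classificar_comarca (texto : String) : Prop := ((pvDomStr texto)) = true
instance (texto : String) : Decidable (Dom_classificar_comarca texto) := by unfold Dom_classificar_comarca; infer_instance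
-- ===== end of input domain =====

-- B replaces A's five short-circuiting if-any branches by one exhaustive pass over a flat
-- (priority, label, keyword) table with a best-match accumulator (alternative decomposition).

-- ===== PORT A =====
def classificar_comarca (texto : String) : String :=
  let lower := PySem.Str.lower texto
  if ["governador valadares", "ipatinga", "coronel fabriciano",
      "timoteo", "caratinga", "aimores", "mantena",
      "teofilo otoni", "nanuque"].any (fun c => PySem.Str.isIn c lower) then
    "GV-e-regiao"
  else if ["juiz de fora", "barbacena", "muriae", "manhuacu",
           "ponte nova", "santos dumont"].any (fun c => PySem.Str.isIn c lower) then
    "Zona-Mata-Sul"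
  else if ["uberlandia", "uberaba", "ituiutaba", "araxa",
           "patos de minas"].any (fun c => PySem.Str.isIn c lower) then
    "Triangulo-Alto-Paranaiba"
  else if ["belo horizonte", "contagem", "betim", "santa luzia",
           "ribeirao das neves", "nova lima", "lagoa santa", "sete lagoas"].any
            (fun c => PySem.Str.isIn c lower) then
    "BH-metropolitana"
  else if ["montes claros", "pirapora", "januaria", "janauba", "salinas"].any
            (fun c => PySem.Str.isIn c lower) then
    "Norte-Mineiro"
  else
    "Outros-regiao-MG"

-- ===== PORT B =====
-- the grouped region data of Source B
def pvGrupos : List (String × List String) :=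
  [("GV-e-regiao", ["governador valadares", "ipatinga", "coronel fabriciano",
                    "timoteo", "caratinga", "aimores", "mantena",
                    "teofilo otoni", "nanuque"]),
   ("Zona-Mata-Sul", ["juiz de fora", "barbacena", "muriae", "manhuacu",
                      "ponte nova", "santos dumont"]),
   ("Triangulo-Alto-Paranaiba", ["uberlandia", "uberaba", "ituiutaba", "araxa",
                                 "patos de minas"]),
   ("BH-metropolitana", ["belo horizonte", "contagem", "betim", "santa luzia",
                         "ribeirao das neves", "nova lima", "lagoa santa", "sete lagoas"]),
   ("Norte-Mineiro", ["montes claros", "pirapora", "januaria", "janauba", "salinas"])]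

-- the flat (priority, label, keyword) comprehension of Source B, built from the enumerated groups
def pvPalavras : List (Nat × String × String) :=
  (pvGrupos.zipIdx).flatMap
    (fun pg => pg.1.2.map (fun kw => (pg.2, pg.1.1, kw)))

def classificar_comarca_alt (texto : String) : String :=
  let lower := PySem.Str.lower texto
  (pvPalavras.foldl
    (fun st t =>
      if t.1 < st.1 && PySem.Str.isIn t.2.2 lower then (t.1, t.2.1) else st)
    (5, "Outros-regiao-MG")).2

-- ===== PRECONDITION & SPEC =====
def Spec_classificar_comarca (texto : String) (out : String) : Prop := out = classificar_comarca_alt texto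
instance (texto : String) (out : String) : Decidable (Spec_classificar_comarca texto out) := by unfold Spec_classificar_comarca; infer_instance

-- ===== CLAIM (what is proved, stated in full; the proofs are below) =====
def Claim_equal_classificar_comarca : Prop := ∀ (texto : String), Dom_classificar_comarca texto → Spec_classificar_comarca texto (classificar_comarca texto)

-- ===== LEMMAS AND PROOFS =====

-- folding B's update over one region's keywords (constant priority p and label nm)
-- either installs (p, nm) — iff some keyword matches and p beats the accumulator — or leaves the state.
theorem pvFold_region (lower : String) (p : Nat) (nm : String) (kws : List String)
    (st : Nat × String) :
    (kws.map (fun kw => (p, nm, kw))).foldl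
      (fun st t =>
        if t.1 < st.1 && PySem.Str.isIn t.2.2 lower then (t.1, t.2.1) else st) st
    = if p < st.1 && kws.any (fun c => PySem.Str.isIn c lower) then (p, nm) else st := by
  induction kws generalizing st with
  | nil => simp
  | cons kw rest ih =>
      simp only [List.map_cons, List.foldl_cons, List.any_cons, ih]
      by_cases hp : p < st.1
      · by_cases hk : PySem.Chars.isIn kw.toList lower.toList = true
        · simp [hp, hk, PySem.Str.isIn]
        · simp [hp, hk, PySem.Str.isIn]
      · simp [hp]

-- ===== VERDICT (by name: the statement is the Claim_ definition above) =====
theorem classificar_comarca_spec : Claim_equal_classificar_comarca := by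
  intro texto _
  unfold Spec_classificar_comarca classificar_comarca classificar_comarca_alt pvPalavras pvGrupos
  simp only [List.zipIdx, List.flatMap_cons, List.flatMap_nil,
    List.append_nil, List.foldl_append, pvFold_region]
  set lower := PySem.Str.lower texto with hl
  cases h1 : (["governador valadares", "ipatinga", "coronel fabriciano",
      "timoteo", "caratinga", "aimores", "mantena",
      "teofilo otoni", "nanuque"] : List String).any (fun c => PySem.Str.isIn c lower) <;>
  cases h2 : (["juiz de fora", "barbacena", "muriae", "manhuacu",
           "ponte nova", "santos dumont"] : List String).any (fun c => PySem.Str.isIn c lower) <;>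
  cases h3 : (["uberlandia", "uberaba", "ituiutaba", "araxa",
           "patos de minas"] : List String).any (fun c => PySem.Str.isIn c lower) <;>
  cases h4 : (["belo horizonte", "contagem", "betim", "santa luzia",
           "ribeirao das neves", "nova lima", "lagoa santa", "sete lagoas"] : List String).any (fun c => PySem.Str.isIn c lower) <;>
  cases h5 : (["montes claros", "pirapora", "januaria", "janauba", "salinas"] : List String).any (fun c => PySem.Str.isIn c lower) <;>
  ((try simp only [h1, h2, h3, h4, h5]); decide)
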